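-- pv_equiv track=rewrite | github.com/wjy3452801181-a11y/PayFi-Box | apps/api/app/modules/risk/reason_codes.py | normalize_reason_codes
-- ===== SOURCE A (Python) =====
-- from typing import Iterable
--
-- RISK_REASON_CODE_ORDER = [
--     "BLACKLISTED_BENEFICIARY",
--     "HIGH_RISK_BENEFICIARY",
--     "MEDIUM_RISK_BENEFICIARY",
--     "UNRESOLVED_BENEFICIARY",
--     "HIGH_AMOUNT",
--     "CROSS_BORDER",
--     "SPLIT_PAYMENT",
--     "MISSING_REFERENCE_FOR_TRADE_PAYMENT",
--     "PASS_BASELINE_POLICY",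
-- ]
--
-- RISK_REASON_CODE_ALIASES = {
--     "HIGH_RISK_CORRIDOR": "CROSS_BORDER",
--     "MANUAL_REVIEW_REQUIRED": "HIGH_AMOUNT",
--     "SANCTIONS_MATCH": "BLACKLISTED_BENEFICIARY",
-- }
--
-- RISK_REASON_CODE_SET = set(RISK_REASON_CODE_ORDER)
--
-- def normalize_reason_code(code: str) -> str | None:
--     normalized = str(code).strip().upper()
--     normalized = RISK_REASON_CODE_ALIASES.get(normalized, normalized)
--     if normalized in RISK_REASON_CODE_SET:
--         return normalized
--     return None
--
-- def normalize_reason_codes(codes: Iterable[str] | None) -> list[str]: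
--     if not codes:
--         return []
--     seen: set[str] = set()
--     normalized_codes: list[str] = []
--     for code in codes:
--         normalized = normalize_reason_code(code)
--         if normalized and normalized not in seen:
--             seen.add(normalized)
--             normalized_codes.append(normalized)
--
--     order_index = {code: idx for idx, code in enumerate(RISK_REASON_CODE_ORDER)}
--     normalized_codes.sort(key=lambda item: order_index.get(item, 999))
--     return normalized_codes
-- ===== SOURCE B (Python) =====
-- RISK_REASON_CODE_ORDER = [
--     "BLACKLISTED_BENEFICIARY",
--     "HIGH_RISK_BENEFICIARY",
--     "MEDIUM_RISK_BENEFICIARY",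
--     "UNRESOLVED_BENEFICIARY",
--     "HIGH_AMOUNT",
--     "CROSS_BORDER",
--     "SPLIT_PAYMENT",
--     "MISSING_REFERENCE_FOR_TRADE_PAYMENT",
--     "PASS_BASELINE_POLICY",
-- ]
--
-- RISK_REASON_CODE_ALIASES = {
--     "HIGH_RISK_CORRIDOR": "CROSS_BORDER",
--     "MANUAL_REVIEW_REQUIRED": "HIGH_AMOUNT",
--     "SANCTIONS_MATCH": "BLACKLISTED_BENEFICIARY",
-- }
--
-- RISK_REASON_CODE_SET = set(RISK_REASON_CODE_ORDER)
--
-- def normalize_reason_code(code):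
--     normalized = str(code).strip().upper()
--     normalized = RISK_REASON_CODE_ALIASES.get(normalized, normalized)
--     if normalized in RISK_REASON_CODE_SET:
--         return normalized
--     return None
--
-- def normalize_reason_codes(codes):
--     if not codes:
--         return []
--     present = set()
--     for code in codes:
--         normalized = normalize_reason_code(code)
--         if normalized:
--             present.add(normalized)
--     return [code for code in RISK_REASON_CODE_ORDER if code in present]
-- ===== Notes on version B (the rewrite author's own statement) =====
-- stated objective: simpler
-- what changed: B collects the set of normalized valid codes in one pass and then emits RISK_REASON_CODE_ORDER filtered by membership in that set, dropping A's dedup list, order_index dict and the sort entirely.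
import Mathlib
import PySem

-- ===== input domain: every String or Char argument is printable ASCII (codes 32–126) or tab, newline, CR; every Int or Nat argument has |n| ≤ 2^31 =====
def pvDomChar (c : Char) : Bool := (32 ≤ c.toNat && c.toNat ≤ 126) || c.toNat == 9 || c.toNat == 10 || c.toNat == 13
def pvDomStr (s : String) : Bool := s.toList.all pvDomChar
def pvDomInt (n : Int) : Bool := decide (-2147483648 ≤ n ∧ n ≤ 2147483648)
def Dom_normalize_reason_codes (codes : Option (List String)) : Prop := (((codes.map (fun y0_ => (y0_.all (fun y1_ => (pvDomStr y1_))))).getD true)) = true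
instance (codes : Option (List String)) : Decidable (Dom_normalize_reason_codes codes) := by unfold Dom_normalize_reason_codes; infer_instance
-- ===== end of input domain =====

-- B replaces A's scan-then-sort (dedup list + order_index dict + .sort) by building the set
-- of normalized valid codes in one pass and filtering the fixed canonical order list by membership.

-- module-level context shared by both Pythons
def pvOrder : List String :=
  ["BLACKLISTED_BENEFICIARY", "HIGH_RISK_BENEFICIARY", "MEDIUM_RISK_BENEFICIARY",
   "UNRESOLVED_BENEFICIARY", "HIGH_AMOUNT", "CROSS_BORDER", "SPLIT_PAYMENT",
   "MISSING_REFERENCE_FOR_TRADE_PAYMENT", "PASS_BASELINE_POLICY"]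

def pvAliases : PySem.Dict String String :=
  PySem.Dict.ofList
    [("HIGH_RISK_CORRIDOR", "CROSS_BORDER"),
     ("MANUAL_REVIEW_REQUIRED", "HIGH_AMOUNT"),
     ("SANCTIONS_MATCH", "BLACKLISTED_BENEFICIARY")]

def pvCodeSet : PySem.Set String := PySem.Set.ofList pvOrder

def normalize_reason_code (code : String) : Option String :=
  let normalized := PySem.Str.upper (PySem.Str.strip code)
  let normalized := PySem.Dict.getD pvAliases normalized normalized
  if PySem.Set.contains pvCodeSet normalized then some normalized else none

-- ===== PORT A =====
-- {code: idx for idx, code in enumerate(RISK_REASON_CODE_ORDER)}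
def pvOrderIndex : PySem.Dict String Int :=
  (PySem.List.enumerate pvOrder 0).foldl (fun d p => d.insert p.2 p.1) PySem.Dict.empty

-- sort key: order_index.get(item, 999)
def pvKey (item : String) : Int := PySem.Dict.getD pvOrderIndex item 999

-- loop body of A: 'if normalized and normalized not in seen: seen.add(...); list.append(...)'
def pvStepA (st : PySem.Set String × List String) (code : String) : PySem.Set String × List String :=
  match normalize_reason_code code with
  | some n => if n ≠ "" ∧ PySem.Set.contains st.1 n = false
              then (PySem.Set.add st.1 n, st.2 ++ [n]) else st
  | none => st

def normalize_reason_codes (codes : Option (List String)) : List String :=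
  match codes with
  | none => []
  | some cs =>
    if cs = [] then []
    else
      let st := cs.foldl pvStepA (PySem.Set.empty, [])
      PySem.List.sorted st.2 pvKey false

-- ===== PORT B =====
-- loop body of B: 'if normalized: present.add(normalized)'
def pvStepB (s : PySem.Set String) (code : String) : PySem.Set String :=
  match normalize_reason_code code with
  | some n => if n ≠ "" then PySem.Set.add s n else s
  | none => s

def normalize_reason_codes_alt (codes : Option (List String)) : List String :=
  match codes with
  | none => []
  | some cs =>
    if cs = [] then []
    else
      let present := cs.foldl pvStepB PySem.Set.empty
      pvOrder.filter (fun c => PySem.Set.contains present c)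

-- ===== PRECONDITION & SPEC =====
def Spec_normalize_reason_codes (codes : Option (List String)) (out : List String) : Prop := out = normalize_reason_codes_alt codes
instance (codes : Option (List String)) (out : List String) : Decidable (Spec_normalize_reason_codes codes out) := by unfold Spec_normalize_reason_codes; infer_instance

-- ===== CLAIM (what is proved, stated in full; the proofs are below) =====
def Claim_equal_normalize_reason_codes : Prop := ∀ (codes : Option (List String)), Dom_normalize_reason_codes codes → Spec_normalize_reason_codes codes (normalize_reason_codes codes)

-- ===== LEMMAS AND PROOFS =====

lemma nrc_some (code n : String) (h : normalize_reason_code code = some n) :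
    n ∈ pvOrder ∧ n ≠ "" := by
  unfold normalize_reason_code at h
  simp only [] at h
  split at h
  · rename_i hc
    injection h with h'
    rw [h'] at hc
    have hord : n ∈ pvOrder := (PySem.Set.mem_ofList _ _).mp ((PySem.Set.contains_iff _ _).mp hc)
    refine ⟨hord, ?_⟩
    unfold pvOrder at hord
    simp at hord
    rcases hord with h|h|h|h|h|h|h|h|h <;> subst h <;> decide
  · exact absurd h (by simp)

lemma stepA_none (st : PySem.Set String × List String) (c : String)
    (h : normalize_reason_code c = none) : pvStepA st c = st := by
  unfold pvStepA; rw [h]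

lemma stepB_none (s : PySem.Set String) (c : String)
    (h : normalize_reason_code c = none) : pvStepB s c = s := by
  unfold pvStepB; rw [h]

lemma stepA_some (st : PySem.Set String × List String) (c n : String)
    (h : normalize_reason_code c = some n) (hne : n ≠ "") :
    pvStepA st c = if PySem.Set.contains st.1 n = false
                   then (PySem.Set.add st.1 n, st.2 ++ [n]) else st := by
  unfold pvStepA; rw [h]; dsimp only
  by_cases hp : PySem.Set.contains st.1 n = false
  · rw [if_pos ⟨hne, hp⟩, if_pos hp]
  · rw [if_neg (fun hh => hp hh.2), if_neg hp]

lemma stepB_some (s : PySem.Set String) (c n : String)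
    (h : normalize_reason_code c = some n) (hne : n ≠ "") :
    pvStepB s c = PySem.Set.add s n := by
  unfold pvStepB; rw [h]; dsimp only; rw [if_pos hne]

-- the joint invariant of the two loops
lemma pv_loop (cs : List String) :
    ∀ (seen : PySem.Set String) (acc : List String) (present : PySem.Set String),
    (∀ x, x ∈ seen ↔ x ∈ acc) → acc.Nodup → (∀ x ∈ acc, x ∈ pvOrder) →
    (∀ x, x ∈ present ↔ x ∈ acc) →
    (∀ x, x ∈ (cs.foldl pvStepA (seen, acc)).1 ↔ x ∈ (cs.foldl pvStepA (seen, acc)).2) ∧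
    (cs.foldl pvStepA (seen, acc)).2.Nodup ∧
    (∀ x ∈ (cs.foldl pvStepA (seen, acc)).2, x ∈ pvOrder) ∧
    (∀ x, x ∈ cs.foldl pvStepB present ↔ x ∈ (cs.foldl pvStepA (seen, acc)).2) := by
  induction cs with
  | nil => intro seen acc present h1 h2 h3 h4; exact ⟨h1, h2, h3, h4⟩
  | cons c rest ih =>
    intro seen acc present h1 h2 h3 h4
    simp only [List.foldl_cons]
    rcases hc : normalize_reason_code c with _ | n
    · rw [stepA_none _ _ hc, stepB_none _ _ hc]
      exact ih seen acc present h1 h2 h3 h4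
    · have hn := nrc_some c n hc
      rw [stepA_some _ _ _ hc hn.2, stepB_some _ _ _ hc hn.2]
      by_cases hmem : n ∈ acc
      · have hcont : PySem.Set.contains seen n = true :=
          (PySem.Set.contains_iff _ _).mpr ((h1 n).mpr hmem)
        rw [if_neg (by rw [hcont]; simp), PySem.Set.add_of_mem ((h4 n).mpr hmem)]
        exact ih seen acc present h1 h2 h3 h4
      · have hcont : PySem.Set.contains seen n = false := by
          by_contra h
          exact hmem ((h1 n).mp ((PySem.Set.contains_iff _ _).mp (by simpa using h)))
        rw [if_pos hcont]
        apply ih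
        · intro x; rw [PySem.Set.mem_add]; simp [h1 x]
        · exact List.Nodup.append h2 (List.nodup_singleton n) (fun a ha hb => by simp at hb; exact hmem (hb ▸ ha))
        · intro x hx
          rcases List.mem_append.mp hx with h | h
          · exact h3 x h
          · simp at h; subst h; exact hn.1
        · intro x; rw [PySem.Set.mem_add]; simp [h4 x]

lemma pv_orderIndex_pairwise : pvOrder.Pairwise (fun a b => pvKey a < pvKey b) := by decide

lemma pv_order_nodup : pvOrder.Nodup := by decide

lemma pv_main (cs : List String) :
    PySem.List.sorted (cs.foldl pvStepA (PySem.Set.empty, [])).2 pvKey false =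
      pvOrder.filter (fun c => PySem.Set.contains (cs.foldl pvStepB PySem.Set.empty) c) := by
  obtain ⟨h1, h2, h3, h4⟩ := pv_loop cs PySem.Set.empty [] PySem.Set.empty
    (by simp [PySem.Set.empty]) (by simp) (by simp) (by simp [PySem.Set.empty])
  apply PySem.List.sorted_eq_of_perm_of_pairwise_lt
  · rw [List.perm_ext_iff_of_nodup (List.Nodup.filter _ pv_order_nodup) h2]
    intro x
    simp only [List.mem_filter, PySem.Set.contains_eq_listContains, List.contains_iff_mem]
    constructor
    · rintro ⟨_, hx⟩; exact (h4 x).mp hx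
    · intro hx; exact ⟨h3 x hx, (h4 x).mpr hx⟩
  · exact List.Pairwise.sublist List.filter_sublist pv_orderIndex_pairwise

-- ===== VERDICT (by name: the statement is the Claim_ definition above) =====
theorem normalize_reason_codes_spec : Claim_equal_normalize_reason_codes := by
  intro codes _
  unfold Spec_normalize_reason_codes normalize_reason_codes normalize_reason_codes_alt
  match codes with
  | none => rfl
  | some cs =>
    by_cases h : cs = []
    · simp [h]
    · simp only [h]
      exact pv_main cs
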